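-- pv_equiv track=rewrite | github.com/drizztSun/common_project | PythonLeetcode/leetcodeM/1726_TupleWithSameProduct.py | doit_hashtable
-- ===== SOURCE A (Python) =====
-- def doit_hashtable(nums: list) -> int:
--
--     from collections import defaultdict
--
--     buff = defaultdict(int)
--
--     for i in range(len(nums)):
--         for j in range(i):
--             buff[nums[i] * nums[j]] += 1
--
--     ans = 0
--     for k, v in buff.items():
--         ans += 4 * v * (v - 1)
--
--     return ans
-- ===== SOURCE B (Python) =====
-- def doit_hashtable(nums: list) -> int:
--     prods = sorted(nums[i] * nums[j]
--                    for i in range(len(nums)) for j in range(i))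
--     ans = 0
--     run = 0
--     prev = None
--     for p in prods:
--         if prev is not None and p == prev:
--             run += 1
--         else:
--             ans += 4 * run * (run - 1)
--             run = 1
--             prev = p
--     return ans + 4 * run * (run - 1)
-- ===== Notes on version B (the rewrite author's own statement) =====
-- stated objective: alternative
-- what changed: B drops the hash-map frequency table entirely: it materialises the list of pair products, sorts it, and computes the answer in one linear scan over the sorted list, adding 4*v*(v-1) at the end of each run of equal products; A builds a dict of counts and reduces it in a second pass.
import Mathlib
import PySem

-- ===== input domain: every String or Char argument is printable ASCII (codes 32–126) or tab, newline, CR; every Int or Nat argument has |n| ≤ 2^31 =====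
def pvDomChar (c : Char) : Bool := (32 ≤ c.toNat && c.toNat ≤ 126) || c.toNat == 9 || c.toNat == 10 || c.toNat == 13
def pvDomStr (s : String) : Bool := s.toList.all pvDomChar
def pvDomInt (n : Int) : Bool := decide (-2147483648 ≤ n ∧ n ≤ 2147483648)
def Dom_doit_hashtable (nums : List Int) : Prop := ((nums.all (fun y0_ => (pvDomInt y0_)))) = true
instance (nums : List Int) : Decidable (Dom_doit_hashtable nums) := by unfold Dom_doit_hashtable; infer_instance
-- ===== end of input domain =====

-- B replaces A's hash-map-of-counts-plus-reduction-pass with sort-then-scan over the pair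
-- products (no dictionary); the return values are proved equal.

-- ===== PORT A =====
def doit_hashtable (nums : List Int) : Int :=
  let buff :=
    (PySem.List.pyRange 0 (nums.length : Int) 1).foldl (fun buff i =>
      (PySem.List.pyRange 0 i 1).foldl (fun buff j =>
        buff.modify (PySem.List.pyGetD nums i 0 * PySem.List.pyGetD nums j 0) 0 (· + 1)) buff)
      PySem.Dict.empty
  buff.items.foldl (fun ans kv => ans + 4 * kv.2 * (kv.2 - 1)) 0

-- ===== PORT B =====
def doit_hashtable_alt (nums : List Int) : Int :=
  let prods := PySem.List.sorted
    ((PySem.List.pyRange 0 (nums.length : Int) 1).flatMap (fun i =>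
      (PySem.List.pyRange 0 i 1).map (fun j =>
        PySem.List.pyGetD nums i 0 * PySem.List.pyGetD nums j 0)))
    (fun x => x) false
  let st := prods.foldl (fun (st : Option Int × Int × Int) p =>
      if st.1 = some p then (st.1, st.2.1 + 1, st.2.2)
      else (some p, 1, st.2.2 + 4 * st.2.1 * (st.2.1 - 1))) (none, 0, 0)
  st.2.2 + 4 * st.2.1 * (st.2.1 - 1)

-- ===== PRECONDITION & SPEC =====
def Spec_doit_hashtable (nums : List Int) (out : Int) : Prop := out = doit_hashtable_alt nums
instance (nums : List Int) (out : Int) : Decidable (Spec_doit_hashtable nums out) := by unfold Spec_doit_hashtable; infer_instance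

-- ===== CLAIM (what is proved, stated in full; the proofs are below) =====
def Claim_equal_doit_hashtable : Prop := ∀ (nums : List Int), Dom_doit_hashtable nums → Spec_doit_hashtable nums (doit_hashtable nums)

-- ===== LEMMAS AND PROOFS =====

-- the list of products nums[i]*nums[j] for j < i, in loop order
def pvProds (nums : List Int) : List Int :=
  (PySem.List.pyRange 0 (nums.length : Int) 1).flatMap (fun i =>
    (PySem.List.pyRange 0 i 1).map (fun j =>
      PySem.List.pyGetD nums i 0 * PySem.List.pyGetD nums j 0))

-- A's answer as a sum over the distinct products
def pvASum (ps : List Int) : Int :=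
  ((PySem.Set.ofList ps).map (fun k => 4 * (ps.count k : Int) * ((ps.count k : Int) - 1))).sum

-- B's run scan: state = (prev, run, ans); final answer closes the last run
def pvStep (st : Option Int × Int × Int) (p : Int) : Option Int × Int × Int :=
  if st.1 = some p then (st.1, st.2.1 + 1, st.2.2)
  else (some p, 1, st.2.2 + 4 * st.2.1 * (st.2.1 - 1))

def pvScan (l : List Int) (st : Option Int × Int × Int) : Int :=
  let r := l.foldl pvStep st
  r.2.2 + 4 * r.2.1 * (r.2.1 - 1)


-- a nested foldl over an index range with inner generated lists is a foldl over the flattened list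
lemma foldl_flatMap {α β γ : Type} (l : List α) (g : α → List β) (step : γ → β → γ) (init : γ) :
    (l.flatMap g).foldl step init = l.foldl (fun s i => (g i).foldl step s) init := by
  induction l generalizing init with
  | nil => rfl
  | cons a l ih => simp [List.flatMap_cons, List.foldl_append, ih]

lemma doit_hashtable_eq_prods (nums : List Int) :
    doit_hashtable nums
      = ((pvProds nums).foldl (fun d x => d.modify x 0 (· + 1)) PySem.Dict.empty).items.foldl
          (fun ans kv => ans + 4 * kv.2 * (kv.2 - 1)) 0 := by
  unfold doit_hashtable pvProds
  rw [foldl_flatMap]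
  simp [List.foldl_map]

lemma itemsum_eq_pvASum (ps : List Int) :
    ((ps.foldl (fun d x => d.modify x 0 (· + 1)) PySem.Dict.empty).items.foldl
        (fun ans kv => ans + 4 * kv.2 * (kv.2 - 1)) 0) = pvASum ps := by
  rw [← PySem.Dict.counter_eq_foldl, PySem.Dict.items_counter]
  rw [PySem.List.foldl_add]
  unfold pvASum
  simp [List.map_map, Function.comp_def]

lemma alt_eq_scan (nums : List Int) :
    doit_hashtable_alt nums
      = pvScan (PySem.List.sorted (pvProds nums) (fun x => x) false) (none, 0, 0) := by
  rfl

-- the answer component of the scan state only accumulates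
lemma foldl_shift (l : List Int) : ∀ (pv : Option Int) (r a : Int),
    l.foldl pvStep (pv, r, a)
      = ((l.foldl pvStep (pv, r, 0)).1, (l.foldl pvStep (pv, r, 0)).2.1,
          a + (l.foldl pvStep (pv, r, 0)).2.2) := by
  induction l with
  | nil => intro pv r a; simp
  | cons p l ih =>
    intro pv r a
    simp only [List.foldl_cons, pvStep]
    by_cases h : pv = some p
    · rw [if_pos h, if_pos h]
      exact ih pv (r + 1) a
    · rw [if_neg h, if_neg h]
      rw [ih (some p) 1 (a + 4 * r * (r - 1)), ih (some p) 1 (0 + 4 * r * (r - 1))]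
      simp only [Prod.mk.injEq]
      refine ⟨trivial, trivial, by ring⟩

lemma pvScan_ans (l : List Int) (pv : Option Int) (r a : Int) :
    pvScan l (pv, r, a) = a + pvScan l (pv, r, 0) := by
  simp only [pvScan]
  rw [foldl_shift l pv r a]
  ring

-- a block of elements all equal to the previous value only lengthens the run
lemma pvScan_run (t : List Int) (v : Int) : ∀ (d : List Int) (r a : Int), (∀ x ∈ t, x = v) →
    pvScan (t ++ d) (some v, r, a) = pvScan d (some v, r + (t.length : Int), a) := by
  induction t with
  | nil => intro d r a _; simp
  | cons x t ih =>
    intro d r a ht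
    have hx : x = v := ht x List.mem_cons_self
    subst hx
    simp only [List.cons_append, pvScan, List.foldl_cons, pvStep, reduceIte]
    have hrec := ih d (r + 1) a (fun y hy => ht y (List.mem_cons_of_mem _ hy))
    simp only [pvScan] at hrec
    rw [hrec]
    have hlen : r + 1 + (t.length : Int) = r + ((x :: t).length : Int) := by
      push_cast [List.length_cons]; ring
    rw [hlen]

-- once the run cannot continue (prev absent from the rest), closing it now is the same
lemma pvScan_reset (l : List Int) (v : Int) (hv : v ∉ l) (r a : Int) :
    pvScan l (some v, r, a) = pvScan l (none, 0, a + 4 * r * (r - 1)) := by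
  cases l with
  | nil => norm_num [pvScan]
  | cons p l =>
    have hpv : p ≠ v := fun h => hv (h ▸ List.mem_cons_self)
    have h1 : ¬ ((some v : Option Int) = some p) := by
      intro h; exact hpv (Option.some.inj h).symm
    have h2 : ¬ ((none : Option Int) = some p) := by simp
    simp only [pvScan, List.foldl_cons, pvStep]
    rw [if_neg h1, if_neg h2]
    norm_num

-- in a nondecreasing list bounded below by p, dropping the leading p's removes all p's
lemma not_mem_dropWhile (p : Int) : ∀ (l : List Int), l.Pairwise (· ≤ ·) → (∀ x ∈ l, p ≤ x) →
    p ∉ l.dropWhile (fun x => x == p) := by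
  intro l
  induction l with
  | nil => intro _ _; simp
  | cons q l ih =>
    intro hpw hb
    rw [List.dropWhile_cons]
    by_cases hq : q = p
    · simp only [hq, beq_self_eq_true, if_true]
      exact ih (List.pairwise_cons.mp hpw).2 (fun x hx => hb x (List.mem_cons_of_mem _ hx))
    · have hbeq : (q == p) = false := beq_eq_false_iff_ne.mpr hq
      simp only [hbeq, Bool.false_eq_true, if_false]
      intro hmem
      rcases List.mem_cons.mp hmem with h | h
      · exact hq h.symm
      · have hpq : p < q := lt_of_le_of_ne (hb q List.mem_cons_self) (fun h => hq h.symm)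
        have hqp : q ≤ p := (List.pairwise_cons.mp hpw).1 p h
        omega

-- a sum of f(count l k) over any duplicate-free enumeration of l's values is pvASum l
lemma sum_nodup_count (l D : List Int) (hnd : D.Nodup) (hm : ∀ k, k ∈ D ↔ k ∈ l) :
    (D.map (fun k => 4 * (l.count k : Int) * ((l.count k : Int) - 1))).sum = pvASum l := by
  have hperm : D.Perm (PySem.Set.ofList l) := by
    rw [List.perm_ext_iff_of_nodup hnd (PySem.Set.nodup_ofList l)]
    intro a
    rw [hm, PySem.Set.mem_ofList]
  exact (hperm.map _).sum_eq

lemma pvASum_sorted (l : List Int) :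
    pvASum (PySem.List.sorted l (fun x => x) false) = pvASum l := by
  have hp : (PySem.List.sorted l (fun x => x) false).Perm l := PySem.List.sorted_perm l _ _
  unfold pvASum
  calc ((PySem.Set.ofList (PySem.List.sorted l (fun x => x) false)).map
          (fun k => 4 * ((PySem.List.sorted l (fun x => x) false).count k : Int) *
            (((PySem.List.sorted l (fun x => x) false).count k : Int) - 1))).sum
      = ((PySem.Set.ofList (PySem.List.sorted l (fun x => x) false)).map
          (fun k => 4 * (l.count k : Int) * ((l.count k : Int) - 1))).sum := by
        exact congrArg _ (List.map_congr_left (fun k _ => by rw [hp.count_eq]))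
    _ = pvASum l := by
        apply sum_nodup_count
        · exact PySem.Set.nodup_ofList _
        · intro k; rw [PySem.Set.mem_ofList, hp.mem_iff]

-- core: the run scan over a nondecreasing list computes the per-group sum
lemma scan_sorted : ∀ (n : Nat) (l : List Int), l.length ≤ n → l.Pairwise (· ≤ ·) →
    pvScan l (none, 0, 0) = pvASum l := by
  intro n
  induction n with
  | zero =>
    intro l hl _
    have : l = [] := List.eq_nil_of_length_eq_zero (Nat.le_zero.mp hl)
    subst this
    norm_num [pvScan, pvASum, PySem.Set.ofList]
  | succ n ih =>
    intro l hl hpw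
    cases l with
    | nil => norm_num [pvScan, pvASum, PySem.Set.ofList]
    | cons p l' =>
      have hpwl' : l'.Pairwise (· ≤ ·) := (List.pairwise_cons.mp hpw).2
      have hb : ∀ x ∈ l', p ≤ x := (List.pairwise_cons.mp hpw).1
      set t := l'.takeWhile (fun x => x == p) with htdef
      set d := l'.dropWhile (fun x => x == p) with hddef
      have htd : t ++ d = l' := List.takeWhile_append_dropWhile
      have ht : ∀ x ∈ t, x = p := by
        intro x hx
        rw [htdef] at hx
        exact eq_of_beq (List.mem_takeWhile_imp (p := fun y => y == p) hx)
      have hpd : p ∉ d := not_mem_dropWhile p l' hpwl' hb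
      have hdsub : d.Sublist l' := List.dropWhile_sublist _
      have hdpw : d.Pairwise (· ≤ ·) := hpwl'.sublist hdsub
      have hdlen : d.length ≤ n := by
        have := hdsub.length_le
        simp [List.length_cons] at hl
        omega
      -- unfold the first step of the scan
      have hstep : pvScan (p :: l') (none, 0, 0) = pvScan l' (some p, 1, 0) := by
        simp only [pvScan, List.foldl_cons, pvStep]
        rw [if_neg (by simp : ¬ ((none : Option Int) = some p))]
        norm_num
      -- counts in p :: l'
      have htcnt : t.count p = t.length := List.count_eq_length.mpr (fun b hb => (ht b hb).symm)
      have hdcnt : d.count p = 0 := List.count_eq_zero_of_not_mem hpd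
      have hcp : ((p :: l').count p : Int) = 1 + (t.length : Int) := by
        rw [← htd]
        simp [List.count_append, htcnt, hdcnt]
        omega
      have hck : ∀ k, k ≠ p → ((p :: l').count k : Int) = (d.count k : Int) := by
        intro k hk
        rw [← htd]
        have h0 : t.count k = 0 := List.count_eq_zero_of_not_mem (fun hkt => hk (ht k hkt))
        simp [List.count_append, h0, Ne.symm hk]
      -- the distinct values of p :: l' are p followed by those of d
      have hsum : pvASum (p :: l')
          = 4 * (1 + (t.length : Int)) * ((1 + (t.length : Int)) - 1) + pvASum d := by
        have hndD : (p :: PySem.Set.ofList d).Nodup := by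
          rw [List.nodup_cons]
          exact ⟨fun h => hpd ((PySem.Set.mem_ofList d p).mp h), PySem.Set.nodup_ofList d⟩
        have hmD : ∀ k, k ∈ (p :: PySem.Set.ofList d) ↔ k ∈ p :: l' := by
          intro k
          rw [List.mem_cons, PySem.Set.mem_ofList, List.mem_cons, ← htd, List.mem_append]
          constructor
          · rintro (rfl | h)
            · exact Or.inl rfl
            · exact Or.inr (Or.inr h)
          · rintro (rfl | h | h)
            · exact Or.inl rfl
            · exact Or.inl (ht k h)
            · exact Or.inr h
        rw [← sum_nodup_count (p :: l') (p :: PySem.Set.ofList d) hndD hmD]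
        rw [List.map_cons, List.sum_cons, hcp]
        congr 1
        unfold pvASum
        exact congrArg _ (List.map_congr_left (fun k hk => by
          have hkp : k ≠ p := fun h => hpd (h ▸ (PySem.Set.mem_ofList d k).mp hk)
          rw [hck k hkp]))
      rw [hstep, ← htd, pvScan_run t p d 1 0 ht, pvScan_reset d p hpd,
          pvScan_ans d none 0, ih d hdlen hdpw, htd, hsum]
      omega

-- ===== VERDICT (by name: the statement is the Claim_ definition above) =====
theorem doit_hashtable_spec : Claim_equal_doit_hashtable := by
  intro nums _
  unfold Spec_doit_hashtable
  rw [doit_hashtable_eq_prods, itemsum_eq_pvASum, alt_eq_scan,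
      scan_sorted (PySem.List.sorted (pvProds nums) (fun x => x) false).length _ le_rfl
        (PySem.List.sorted_pairwise (pvProds nums) (fun x => x)),
      pvASum_sorted]
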